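-- pv_equiv track=rewrite | github.com/33QWERTY33/PortfolioProjects | MadLibs/main.py | replace_delim_w_word
-- ===== SOURCE A (Python) =====
-- def replace_delim_w_word(word_list, line_list):
--     '''
--     replaces the delimeters with the new words
--     params: word_list = list of words to replace delimeters with, line_list = list of lines from file
--     return: new_string = The updated string to be written to the new file
--     '''
--     exempt = False
--     # controls whether it adds characters or not
--     count = 0
--     # controls what word it adds to the new string
--     new_string = ""
--     for line in line_list:
--         for char in line:
--             if char == "<":
--                 new_string += word_list[count]
--                 # add new word to new_string
--                 count += 1
--                 # next word
--                 exempt = True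
--                 # don't add characters to new_line
--             elif char == ">":
--                 exempt = False
--                 # being adding characters to new_line again
--             elif not exempt:
--                 new_string += char
--                 # add the character to the new_line
--     return new_string
-- ===== SOURCE B (Python) =====
-- def replace_delim_w_word(word_list, line_list):
--     text = "".join(line_list)
--     segments = text.split("<")
--     out = segments[0].replace(">", "")
--     count = 0
--     for seg in segments[1:]:
--         out += word_list[count]
--         count += 1
--         i = seg.find(">")
--         if i != -1:
--             out += seg[i+1:].replace(">", "")
--     return out
-- ===== Notes on version B (the rewrite author's own statement) =====
-- stated objective: faster
-- what changed: B joins the lines once, splits the text on '<', and walks whole blocks (emitting word_list[count] per block and the '>'-stripped part after its first '>'), replacing A's per-character exempt-flag state machine with bulk str.split/replace/slice operations.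
import Mathlib
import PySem

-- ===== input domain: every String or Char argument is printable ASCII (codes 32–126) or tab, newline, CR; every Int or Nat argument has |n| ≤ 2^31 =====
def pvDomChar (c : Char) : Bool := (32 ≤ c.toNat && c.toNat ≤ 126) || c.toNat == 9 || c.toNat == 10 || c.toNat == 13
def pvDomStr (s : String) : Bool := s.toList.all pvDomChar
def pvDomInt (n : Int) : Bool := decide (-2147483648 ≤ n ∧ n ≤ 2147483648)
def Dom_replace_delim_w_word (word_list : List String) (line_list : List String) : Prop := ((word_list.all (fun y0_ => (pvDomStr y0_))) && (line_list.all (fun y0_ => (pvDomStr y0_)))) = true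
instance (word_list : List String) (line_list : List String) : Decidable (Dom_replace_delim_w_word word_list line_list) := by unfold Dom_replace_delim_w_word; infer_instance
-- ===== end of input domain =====

-- B replaces A's per-character exempt-flag state machine by a split-on-'<' block walk
-- using bulk string operations (measured constant-factor speedup). Return values only.

-- ===== PORT A =====
-- one step of A's inner loop; word_list[count] is total here via getD ("" when out of
-- range) — the IndexError inputs are excluded by Pre_replace_delim_w_word
def replDelimStepA (word_list : List String) (st : Bool × Nat × List Char) (c : Char) :
    Bool × Nat × List Char :=
  if c = '<' then (true, st.2.1 + 1, st.2.2 ++ (word_list.getD st.2.1 "").toList)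
  else if c = '>' then (false, st.2.1, st.2.2)
  else if !st.1 then (st.1, st.2.1, st.2.2 ++ [c])
  else st

def replace_delim_w_word (word_list : List String) (line_list : List String) : String :=
  String.ofList
    (line_list.foldl (fun st line => line.toList.foldl (replDelimStepA word_list) st)
      (false, 0, ([] : List Char))).2.2

-- ===== PORT B =====
-- the body of B's 'for seg in segments[1:]' loop, on state (count, out)
def replBStep (word_list : List String) (p : Nat × List Char) (seg : List Char) :
    Nat × List Char :=
  let acc := p.2 ++ (word_list.getD p.1 "").toList       -- out += word_list[count] (IndexError excluded by Pre_)
  let i := PySem.Chars.find seg ['>']                    -- i = seg.find(">")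
  if i = -1 then (p.1 + 1, acc)
  else (p.1 + 1, acc ++                                  -- out += seg[i+1:].replace(">", "")
    PySem.Chars.replace (PySem.Chars.slice seg (some (i + 1)) none) ['>'] [])

def replace_delim_w_word_alt (word_list : List String) (line_list : List String) : String :=
  let text := PySem.Chars.join [] (line_list.map String.toList)  -- text = "".join(line_list)
  match PySem.Chars.splitOn text ['<'] with                      -- segments = text.split("<")
  | [] => ""                                                     -- unreachable: split returns ≥ 1 piece
  | s0 :: rest =>
    -- out = segments[0].replace(">", ""); then the loop over segments[1:]
    let res := rest.foldl (replBStep word_list) (0, PySem.Chars.replace s0 ['>'] [])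
    String.ofList res.2

-- ===== PRECONDITION & SPEC =====
-- Pre_ excludes exactly the inputs on which Python A raises IndexError: more '<'
-- delimiters in the text than there are replacement words.
def Pre_replace_delim_w_word (word_list : List String) (line_list : List String) : Prop :=
  (line_list.map String.toList).flatten.count '<' ≤ word_list.length
instance (word_list : List String) (line_list : List String) : Decidable (Pre_replace_delim_w_word word_list line_list) := by unfold Pre_replace_delim_w_word; infer_instance

def pvWitness_replace_delim_w_word : List String × List String := (["cat"], ["a <pet> b"])

def Spec_replace_delim_w_word (word_list : List String) (line_list : List String) (out : String) : Prop := out = replace_delim_w_word_alt word_list line_list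
instance (word_list : List String) (line_list : List String) (out : String) : Decidable (Spec_replace_delim_w_word word_list line_list out) := by unfold Spec_replace_delim_w_word; infer_instance

-- ===== CLAIM (what is proved, stated in full; the proofs are below) =====
def Claim_equal_replace_delim_w_word : Prop := ∀ (word_list : List String) (line_list : List String), Dom_replace_delim_w_word word_list line_list → Pre_replace_delim_w_word word_list line_list → Spec_replace_delim_w_word word_list line_list (replace_delim_w_word word_list line_list)

-- ===== LEMMAS AND PROOFS =====

-- common recursive specification of the output, on the concatenated character stream
def replSpec (w : List String) : Bool → Nat → List Char → List Char
  | _, _, [] => []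
  | _, k, '<' :: t => (w.getD k "").toList ++ replSpec w true (k + 1) t
  | _, k, '>' :: t => replSpec w false k t
  | e, k, c :: t => (if e then [] else [c]) ++ replSpec w e k t

-- the tail a '<'-free segment contributes in exempt state
def replAfter (seg : List Char) : List Char :=
  match seg.findIdx? (· == '>') with
  | none => []
  | some i => (seg.drop (i + 1)).filter (· ≠ '>')

-- B's per-segment recursion, append style
def replG (w : List String) (k : Nat) : List (List Char) → List Char
  | [] => []
  | seg :: rest => (w.getD k "").toList ++ replAfter seg ++ replG w (k + 1) rest

theorem foldA_eq_spec (w : List String) (cs : List Char) :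
    ∀ (e : Bool) (k : Nat) (out : List Char),
      (cs.foldl (replDelimStepA w) (e, k, out)).2.2 = out ++ replSpec w e k cs := by
  induction cs with
  | nil => intro e k out; simp [replSpec]
  | cons c t ih =>
    intro e k out
    by_cases h1 : c = '<'
    · subst h1; simp [replDelimStepA, replSpec, ih]
    · by_cases h2 : c = '>'
      · subst h2; simp [replDelimStepA, replSpec, ih]
      · cases e with
        | false => simp [replDelimStepA, h1, h2, replSpec, ih]
        | true => simp [replDelimStepA, h1, h2, replSpec, ih]

-- a '<'-free prefix char in exempt state contributes nothing
theorem replAfter_cons (c : Char) (h : List Char) (hc : c ≠ '>') :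
    replAfter (c :: h) = replAfter h := by
  unfold replAfter
  rw [List.findIdx?_cons, if_neg (by simpa using hc)]
  cases hfi : h.findIdx? (· == '>') with
  | none => simp
  | some i => simp [List.drop_succ_cons]

theorem spec_eq_split (w : List String) (cs : List Char) :
    ∀ (e : Bool) (k : Nat),
      replSpec w e k cs =
        (if e then replAfter ((cs.splitOnP (· == '<')).headD [])
         else ((cs.splitOnP (· == '<')).headD []).filter (· ≠ '>')) ++
          replG w k (cs.splitOnP (· == '<')).tail := by
  induction cs with
  | nil => intro e k; cases e <;> simp [replSpec, List.splitOnP_nil, replAfter, replG]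
  | cons c t ih =>
    intro e k
    by_cases h1 : c = '<'
    · subst h1
      rw [List.splitOnP_cons]
      obtain ⟨h', t', ht⟩ : ∃ h' t', t.splitOnP (· == '<') = h' :: t' := by
        cases h : t.splitOnP (· == '<') with
        | nil => exact absurd h (List.splitOnP_ne_nil _ t)
        | cons a b => exact ⟨a, b, rfl⟩
      have := ih true (k + 1)
      rw [ht] at this ⊢
      cases e <;> simp [replSpec, replG, replAfter, this]
    · obtain ⟨h', t', ht⟩ : ∃ h' t', t.splitOnP (· == '<') = h' :: t' := by
        cases h : t.splitOnP (· == '<') with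
        | nil => exact absurd h (List.splitOnP_ne_nil _ t)
        | cons a b => exact ⟨a, b, rfl⟩
      have hsplit : (c :: t).splitOnP (· == '<') = (c :: h') :: t' := by
        rw [List.splitOnP_cons, if_neg (by simpa using h1), ht]; rfl
      rw [hsplit]
      by_cases h2 : c = '>'
      · subst h2
        have := ih false k
        rw [ht] at this
        cases e <;> simp [replSpec, this, replAfter, List.findIdx?_cons]
      · have := ih e k
        rw [ht] at this
        cases e with
        | false =>
          rw [if_neg (by decide)] at this
          simp [replSpec, h2, this]
        | true =>
          rw [if_pos rfl] at this
          simp [replSpec, this, replAfter_cons _ _ h2]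

theorem find_go_char (c : Char) (l : List Char) :
    ∀ k : Nat, PySem.Chars.find.go [c] l k =
      match l.findIdx? (· == c) with
      | none => -1
      | some i => ((k + i : Nat) : Int) := by
  induction l with
  | nil => intro k; simp [PySem.Chars.find.go]
  | cons a t ih =>
    intro k
    by_cases h : a = c
    · subst h; simp [PySem.Chars.find.go, List.findIdx?_cons]
    · rw [List.findIdx?_cons, if_neg (by simpa using h)]
      have hpre : ([c].isPrefixOf (a :: t)) = false := by
        simp [List.isPrefixOf]; exact fun hh => absurd hh.symm h
      rw [show PySem.Chars.find.go [c] (a :: t) k = PySem.Chars.find.go [c] t (k + 1) by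
        rw [PySem.Chars.find.go]; simp [hpre]]
      rw [ih (k + 1)]
      cases hfi : t.findIdx? (· == c) with
      | none => rfl
      | some i => simp [Nat.add_comm, Nat.add_left_comm]

theorem replace_go_filter (c : Char) (l : List Char) :
    ∀ (fuel : Nat) (acc : List Char), l.length ≤ fuel →
      PySem.Chars.replace.go [c] [] fuel l acc = acc.reverse ++ l.filter (· ≠ c) := by
  intro fuel
  induction fuel generalizing l with
  | zero =>
    intro acc h
    have : l = [] := by cases l <;> simp_all
    subst this; simp [PySem.Chars.replace.go]
  | succ n ih =>
    intro acc h
    cases l with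
    | nil => simp [PySem.Chars.replace.go]
    | cons a t =>
      by_cases hac : a = c
      · subst hac
        rw [show PySem.Chars.replace.go [a] [] (n + 1) (a :: t) acc
              = PySem.Chars.replace.go [a] [] n t acc by
            rw [PySem.Chars.replace.go]; simp [List.isPrefixOf]]
        rw [ih t acc (by simpa using Nat.le_of_succ_le_succ (by simpa using h))]
        simp
      · rw [show PySem.Chars.replace.go [c] [] (n + 1) (a :: t) acc
              = PySem.Chars.replace.go [c] [] n t (a :: acc) by
            rw [PySem.Chars.replace.go]
            simp [List.isPrefixOf]; exact fun hh => absurd hh.symm hac]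
        rw [ih t (a :: acc) (by simpa using Nat.le_of_succ_le_succ (by simpa using h))]
        simp [hac]

theorem replace_filter (c : Char) (l : List Char) :
    PySem.Chars.replace l [c] [] = l.filter (· ≠ c) := by
  rw [PySem.Chars.replace]
  simpa using replace_go_filter c l l.length [] le_rfl

theorem splitOn_go_char (c : Char) (l : List Char) :
    ∀ (fuel : Nat) (cur : List Char) (acc : List (List Char)), l.length ≤ fuel →
      PySem.Chars.splitOn.go [c] fuel l cur acc =
        acc.reverse ++ (l.splitOnP (· == c)).modifyHead (cur.reverse ++ ·) := by
  intro fuel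
  induction fuel generalizing l with
  | zero =>
    intro cur acc h
    have : l = [] := by cases l <;> simp_all
    subst this; simp [PySem.Chars.splitOn.go, List.splitOnP_nil]
  | succ n ih =>
    intro cur acc h
    cases l with
    | nil => simp [PySem.Chars.splitOn.go, List.splitOnP_nil]
    | cons a t =>
      have hlen : t.length ≤ n := by simpa using Nat.le_of_succ_le_succ (by simpa using h)
      by_cases hac : a = c
      · subst hac
        rw [show PySem.Chars.splitOn.go [a] (n + 1) (a :: t) cur acc
              = PySem.Chars.splitOn.go [a] n t [] (cur.reverse :: acc) by
            rw [PySem.Chars.splitOn.go]; simp [List.isPrefixOf]]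
        rw [ih t [] (cur.reverse :: acc) hlen]
        rw [List.splitOnP_cons]
        simp
        cases t.splitOnP (fun x => x == a) <;> simp
      · rw [show PySem.Chars.splitOn.go [c] (n + 1) (a :: t) cur acc
              = PySem.Chars.splitOn.go [c] n t (a :: cur) acc by
            rw [PySem.Chars.splitOn.go]
            simp [List.isPrefixOf]; exact fun hh => absurd hh.symm hac]
        rw [ih t (a :: cur) acc hlen]
        rw [List.splitOnP_cons, if_neg (by simpa using hac), List.modifyHead_modifyHead]
        cases hsp : t.splitOnP (· == c) with
        | nil => exact absurd hsp (List.splitOnP_ne_nil _ t)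
        | cons x xs => simp

theorem splitOn_char (c : Char) (l : List Char) :
    PySem.Chars.splitOn l [c] = l.splitOnP (· == c) := by
  rw [PySem.Chars.splitOn]
  rw [splitOn_go_char c l (l.length + 1) [] [] (Nat.le_succ _)]
  cases hsp : l.splitOnP (· == c) with
  | nil => exact absurd hsp (List.splitOnP_ne_nil _ l)
  | cons x xs => simp

theorem join_nil_flatten (parts : List (List Char)) :
    PySem.Chars.join [] parts = parts.flatten := by
  rw [PySem.Chars.join]
  induction parts with
  | nil => rfl
  | cons x xs ih =>
    cases xs with
    | nil => simp [List.intercalate]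
    | cons y ys =>
      simp only [List.intercalate, List.intersperse] at ih ⊢
      simp_all

theorem foldB_eq_replG (w : List String) (rest : List (List Char)) :
    ∀ (k : Nat) (acc : List Char),
      (rest.foldl (replBStep w) (k, acc)).2 = acc ++ replG w k rest := by
  induction rest with
  | nil => intro k acc; simp [replG]
  | cons seg t ih =>
    intro k acc
    have hfind : PySem.Chars.find seg ['>'] =
        match seg.findIdx? (· == '>') with
        | none => -1
        | some i => ((i : Nat) : Int) := by
      rw [PySem.Chars.find]
      rw [find_go_char '>' seg 0]
      cases seg.findIdx? (· == '>') <;> simp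
    rw [List.foldl_cons]
    cases hfi : seg.findIdx? (· == '>') with
    | none =>
      rw [hfi] at hfind; simp only [] at hfind
      rw [show replBStep w (k, acc) seg = (k + 1, acc ++ (w.getD k "").toList) by
        rw [replBStep]; simp [hfind]]
      rw [ih (k + 1) (acc ++ (w.getD k "").toList)]
      simp [replG, replAfter, hfi]
    | some idx =>
      rw [hfi] at hfind; simp only [] at hfind
      have hne : ((idx : Nat) : Int) ≠ -1 := by
        intro hh
        have : (0 : Int) ≤ (idx : Nat) := Int.natCast_nonneg _
        omega
      have hslice : PySem.Chars.slice seg (some ((idx : Int) + 1)) none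
          = seg.drop (idx + 1) := by
        rw [PySem.Chars.slice_eq_listSlice]
        rw [show ((idx : Int) + 1) = ((idx + 1 : Nat) : Int) by push_cast; ring]
        rw [PySem.List.slice_from seg (by positivity)]
        simp
      rw [show replBStep w (k, acc) seg
            = (k + 1, acc ++ (w.getD k "").toList ++ (seg.drop (idx + 1)).filter (· ≠ '>')) by
        rw [replBStep]; simp only [hfind, if_neg hne, hslice, replace_filter]]
      rw [ih (k + 1) _]
      simp [replG, replAfter, hfi]

theorem foldl_lines {σ : Type} (f : σ → Char → σ) (ll : List String) (st : σ) :
    ll.foldl (fun st line => line.toList.foldl f st) st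
      = ((ll.map String.toList).flatten).foldl f st := by
  rw [List.foldl_flatten, List.foldl_map]

-- ===== VERDICT (by name: the statement is the Claim_ definition above) =====
theorem replace_delim_w_word_spec : Claim_equal_replace_delim_w_word := by
  intro w ll _ _
  unfold Spec_replace_delim_w_word replace_delim_w_word replace_delim_w_word_alt
  dsimp only
  rw [foldl_lines, foldA_eq_spec, join_nil_flatten, splitOn_char]
  set cs := (ll.map String.toList).flatten with hcs
  cases hsp : cs.splitOnP (· == '<') with
  | nil => exact absurd hsp (List.splitOnP_ne_nil _ cs)
  | cons s0 rest =>
    simp only []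
    rw [foldB_eq_replG w rest 0 _, replace_filter]
    have := spec_eq_split w cs false 0
    rw [hsp] at this
    exact congrArg String.ofList (by simpa using this)
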